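-- pv_equiv track=rewrite | github.com/wlockiv/adventofcode2020 | adventofcode2020/solutions/day03a.py | get_tree_hits
-- ===== SOURCE A (Python) =====
-- import math
-- from typing import IO, List
--
-- def get_tree_hits(dy: int, dx: int, field_input_rows: List[str]):
--     field_height = len(field_input_rows)
--     total_steps = math.ceil(field_height / dy)
--     field_repeats = math.ceil((total_steps * dx) / len(field_input_rows[0]))
--
--     for idx in range(len(field_input_rows)):
--         field_input_rows[idx] = field_input_rows[idx] * field_repeats
--
--     trees_hit = 0
--
--     for step in range(total_steps):
--         x, y = (step * dx, step * dy)
--         if field_input_rows[y][x] == '#':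
--             trees_hit += 1
--
--     return trees_hit
-- ===== SOURCE B (Python) =====
-- # Same hit count, but indexes each visited row modulo its width instead of
-- # materializing repeated rows (and, unlike A, does not mutate the input list).
-- def get_tree_hits(dy, dx, field_input_rows):
--     trees_hit = 0
--     for y in range(0, len(field_input_rows), dy):
--         row = field_input_rows[y]
--         x = (y // dy) * dx
--         if row[x % len(row)] == '#':
--             trees_hit += 1
--     return trees_hit
-- ===== Notes on version B (the rewrite author's own statement) =====
-- stated objective: faster
-- what changed: B walks the visited row indices directly with a stepped range and reads each tree cell by modulo indexing into the original row, instead of first rewriting every row as a repeated string and then looping over steps; B also does not mutate the input list.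
-- outside the precondition, e.g. on get_tree_hits(1, 1, ['###', '##']): A returns 2, B returns 2
import Mathlib
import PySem

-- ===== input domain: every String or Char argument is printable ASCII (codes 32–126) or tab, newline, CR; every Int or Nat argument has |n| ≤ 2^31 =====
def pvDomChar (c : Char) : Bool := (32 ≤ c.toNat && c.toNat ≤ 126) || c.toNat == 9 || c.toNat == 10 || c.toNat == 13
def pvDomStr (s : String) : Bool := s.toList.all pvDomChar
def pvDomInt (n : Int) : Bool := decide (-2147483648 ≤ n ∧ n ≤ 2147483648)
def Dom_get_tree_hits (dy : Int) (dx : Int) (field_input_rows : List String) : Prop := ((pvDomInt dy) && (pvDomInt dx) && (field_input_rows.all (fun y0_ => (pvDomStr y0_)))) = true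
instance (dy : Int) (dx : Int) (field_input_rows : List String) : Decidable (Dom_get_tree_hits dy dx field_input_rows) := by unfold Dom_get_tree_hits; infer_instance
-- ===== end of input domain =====

-- B counts the trees by stepping through the visited row indices and indexing each row
-- modulo its own width, instead of A's materializing of every row repeated `field_repeats`
-- times; equivalence is about the RETURN value only (Python A mutates the input list in
-- place, Python B does not).

-- ===== PORT A =====
-- math.ceil(a/b) is ported as the exact integer ceiling -((-a) // b); exact on the
-- stated domain (the operands are far below the range where float division could
-- round a non-integer quotient onto an integer).
def get_tree_hits (dy : Int) (dx : Int) (field_input_rows : List String) : Int :=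
  let field_height : Int := field_input_rows.length
  let total_steps : Int := -(PySem.Int.floordiv (-field_height) dy)
  let field_repeats : Int :=
    -(PySem.Int.floordiv (-(total_steps * dx))
        (PySem.Str.len ((PySem.List.pyGet? field_input_rows 0).getD "")))
  let rows2 : List String :=
    field_input_rows.map (fun r => String.ofList (PySem.List.pyRepeat r.toList field_repeats))
  (PySem.List.pyRange 0 total_steps 1).foldl (fun acc step =>
    let x := step * dx
    let y := step * dy
    if PySem.Str.pyGet? ((PySem.List.pyGet? rows2 y).getD "") x == some '#' then acc + 1
    else acc) 0

-- ===== PORT B =====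
def get_tree_hits_alt (dy : Int) (dx : Int) (field_input_rows : List String) : Int :=
  (PySem.List.pyRange 0 field_input_rows.length dy).foldl (fun acc y =>
    let row := (PySem.List.pyGet? field_input_rows y).getD ""
    let x := (PySem.Int.floordiv y dy) * dx
    if PySem.Str.pyGet? row (PySem.Int.mod x (PySem.Str.len row)) == some '#' then acc + 1
    else acc) 0

-- ===== PRECONDITION & SPEC =====
-- Pre_ excludes the inputs where A raises (dy = 0, an empty field, an empty first row,
-- dx < 1 with a downward slope) and, beyond that, restricts to the natural domain where
-- every row visited by the slope is at least as wide as row 0 (the repeat count is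
-- computed from row 0's width, so a shorter visited row can raise IndexError); on the
-- excluded shorter-row inputs where A happens to stay in range it still agrees with B.
def Pre_get_tree_hits (dy : Int) (dx : Int) (field_input_rows : List String) : Prop :=
  dy ≠ 0 ∧ field_input_rows ≠ [] ∧
  0 < (field_input_rows.headD "").toList.length ∧
  (0 < dy → 1 ≤ dx ∧ ∀ i : Nat, i < field_input_rows.length → dy ∣ (i : Int) →
    (field_input_rows.headD "").toList.length ≤ ((field_input_rows.getD i "").toList.length))
instance (dy : Int) (dx : Int) (field_input_rows : List String) : Decidable (Pre_get_tree_hits dy dx field_input_rows) := by unfold Pre_get_tree_hits; infer_instance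

def pvWitness_get_tree_hits : Int × Int × List String := (1, 3, ["..#", "#.#"])

def Spec_get_tree_hits (dy : Int) (dx : Int) (field_input_rows : List String) (out : Int) : Prop := out = get_tree_hits_alt dy dx field_input_rows
instance (dy : Int) (dx : Int) (field_input_rows : List String) (out : Int) : Decidable (Spec_get_tree_hits dy dx field_input_rows out) := by unfold Spec_get_tree_hits; infer_instance

-- ===== CLAIM (what is proved, stated in full; the proofs are below) =====
def Claim_equal_get_tree_hits : Prop := ∀ (dy : Int) (dx : Int) (field_input_rows : List String), Dom_get_tree_hits dy dx field_input_rows → Pre_get_tree_hits dy dx field_input_rows → Spec_get_tree_hits dy dx field_input_rows (get_tree_hits dy dx field_input_rows)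

-- ===== LEMMAS AND PROOFS =====

-- character i of a string repeated k times is character i % width of the string
theorem pv_flatten_replicate_getElem? {α : Type} (l : List α) (k i : Nat)
    (h : i < k * l.length) :
    (List.replicate k l).flatten[i]? = l[i % l.length]? := by
  induction k generalizing i with
  | zero => omega
  | succ k ih =>
    rw [List.replicate_succ, List.flatten_cons]
    by_cases hi : i < l.length
    · rw [List.getElem?_append_left hi, Nat.mod_eq_of_lt hi]
    · obtain ⟨j, rfl⟩ : ∃ j, i = l.length + j := ⟨i - l.length, by omega⟩
      rw [List.getElem?_append_right (by omega)]
      simp only [Nat.add_sub_cancel_left, Nat.add_mod_left]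
      exact ih j (by rw [Nat.succ_mul] at h; omega)

theorem get_tree_hits_spec' (dy dx : Int) (rows : List String)
    (hpre : Pre_get_tree_hits dy dx rows) :
    get_tree_hits dy dx rows = get_tree_hits_alt dy dx rows := by
  obtain ⟨hdy0, hne, hw0, hpos⟩ := hpre
  have hh : 0 < (rows.length : Int) := by
    simpa using List.length_pos_iff.mpr hne
  rcases lt_or_gt_of_ne hdy0 with hneg | hposdy
  · -- dy < 0: both programs take no step and return 0
    have hts : 0 ≤ PySem.Int.floordiv (-(rows.length : Int)) dy := by
      rw [show (-(rows.length : Int)) = -(rows.length : Int) from rfl,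
        show dy = -(-dy) by ring, PySem.Int.floordiv_neg_neg,
        PySem.Int.floordiv_eq_ediv_of_pos (by omega : (0:Int) < -dy)]
      exact Int.ediv_nonneg (by omega) (by omega)
    have h2 : PySem.List.pyRange 0 (rows.length : Int) dy = [] := by
      simp only [PySem.List.pyRange, if_neg hdy0, if_neg (by omega : ¬ (0:Int) < dy),
        if_neg (by omega : ¬ (rows.length : Int) < 0)]
      simp
    simp only [get_tree_hits, get_tree_hits_alt,
      PySem.List.pyRange_one_eq_nil (by omega : -PySem.Int.floordiv (-(rows.length:Int)) dy ≤ 0),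
      h2, List.foldl_nil]
  · -- dy > 0
    obtain ⟨hdx, hvis⟩ := hpos hposdy
    obtain ⟨r0, rest, rfl⟩ : ∃ a l, rows = a :: l :=
      List.exists_cons_of_ne_nil hne
    simp only [List.headD_cons] at hvis hw0
    simp only [get_tree_hits, get_tree_hits_alt, PySem.List.pyGet?_zero_cons,
      Option.getD_some, PySem.Str.len_eq]
    set h : Int := ((r0 :: rest).length : Int) with hhdef
    have hhpos : 0 < h := by rw [hhdef]; exact_mod_cast Nat.succ_pos rest.length
    set ts : Int := -PySem.Int.floordiv (-h) dy with htsdef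
    have hts := (PySem.Int.neg_floordiv_neg_eq_iff_of_pos hposdy).mp htsdef.symm
    have hts1 : 1 ≤ ts := by nlinarith [hts.1, hts.2]
    set w0 : Int := ((r0.toList.length : Nat) : Int) with hw0def
    have hw0p : (0:Int) < w0 := by rw [hw0def]; exact_mod_cast hw0
    set reps : Int := -PySem.Int.floordiv (-(ts * dx)) w0 with hrepsdef
    have hreps := (PySem.Int.neg_floordiv_neg_eq_iff_of_pos hw0p).mp hrepsdef.symm
    have hreps1 : 1 ≤ reps := by nlinarith [hreps.2, hts1, hdx, hw0p]
    have hcount : ((h - 0 + dy - 1) / dy).toNat = ts.toNat := by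
      have h1 : ts ≤ (h - 0 + dy - 1) / dy :=
        (Int.le_ediv_iff_mul_le hposdy).mpr (by nlinarith [hts.1])
      have h2 : (h - 0 + dy - 1) / dy < ts + 1 :=
        (Int.ediv_lt_iff_lt_mul hposdy).mpr (by nlinarith [hts.2])
      omega
    have hrange : PySem.List.pyRange 0 h dy = (List.range ts.toNat).map (fun k : Nat => dy * (k:Int)) := by
      rw [PySem.List.pyRange_of_pos 0 h hposdy, if_pos hhpos, hcount]
      simp only [zero_add]
    rw [hrange, PySem.List.pyRange_one 0 ts]
    simp only [List.foldl_map, sub_zero, zero_add]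
    apply List.foldl_ext
    intro acc k hkmem
    have hk : k < ts.toNat := List.mem_range.mp hkmem
    have hkts : (k : Int) ≤ ts - 1 := by omega
    have hynn : (0:Int) ≤ (k:Int) * dy := mul_nonneg (Int.natCast_nonneg k) (by omega)
    have hylt : (k:Int) * dy < h := by nlinarith [hts.1]
    have hmlt : ((k:Int) * dy).toNat < (r0 :: rest).length := by
      generalize hyg : (k:Int) * dy = y at hynn hylt
      omega
    set row : String := (r0 :: rest)[((k:Int) * dy).toNat] with hrowdef
    have hdvd : dy ∣ ((((k:Int) * dy).toNat : Nat) : Int) :=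
      ⟨k, by rw [Int.toNat_of_nonneg hynn]; ring⟩
    have hw0wy : r0.toList.length ≤ row.toList.length := by
      have := hvis (((k:Int) * dy).toNat) hmlt hdvd
      rwa [List.getD_eq_getElem _ "" hmlt] at this
    have hwyp : 0 < row.toList.length := lt_of_lt_of_le hw0 hw0wy
    have hwyI : (0:Int) < (row.toList.length : Int) := by exact_mod_cast hwyp
    have hxnn : (0:Int) ≤ (k:Int) * dx := mul_nonneg (Int.natCast_nonneg k) (by omega)
    have hxlt : (k:Int) * dx < reps * (row.toList.length : Int) := by
      have hc : (w0:Int) ≤ (row.toList.length : Int) := by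
        rw [hw0def]; exact_mod_cast hw0wy
      nlinarith [hreps.2, hkts, hdx, hreps1, hc, hw0p]
    -- the two option-chars are equal
    have hA2 : (PySem.List.pyGet? ((r0 :: rest).map
          (fun r => String.ofList (PySem.List.pyRepeat r.toList reps))) ((k:Int) * dy)).getD ""
        = String.ofList (PySem.List.pyRepeat row.toList reps) := by
      rw [PySem.List.pyGet?_of_nonneg _ hynn, List.getElem?_map,
        List.getElem?_eq_getElem hmlt]
      rfl
    have hB2 : (PySem.List.pyGet? (r0 :: rest) (dy * (k:Int))).getD "" = row := by
      rw [mul_comm dy ((k:Int)), PySem.List.pyGet?_of_nonneg _ hynn,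
        List.getElem?_eq_getElem hmlt]
      rfl
    have hstep : PySem.Int.floordiv (dy * (k:Int)) dy = (k:Int) := by
      rw [PySem.Int.floordiv_eq_ediv_of_pos hposdy, Int.mul_ediv_cancel_left _ (by omega)]
    have hnatbound : ((k:Int) * dx).toNat < reps.toNat * row.toList.length := by
      have : (((k:Int) * dx).toNat : Int) < ((reps.toNat * row.toList.length : Nat) : Int) := by
        push_cast
        rw [Int.toNat_of_nonneg hxnn, Int.toNat_of_nonneg (by omega : (0:Int) ≤ reps)]
        exact hxlt
      exact_mod_cast this
    have hA3 : PySem.Str.pyGet? (String.ofList (PySem.List.pyRepeat row.toList reps)) ((k:Int) * dx)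
        = row.toList[((k:Int) * dx).toNat % row.toList.length]? := by
      rw [PySem.Str.pyGet?_eq]
      simp only [String.toList_ofList, PySem.Chars.pyGet?]
      rw [PySem.List.pyGet?_of_nonneg _ hxnn]
      exact pv_flatten_replicate_getElem? row.toList reps.toNat _ hnatbound
    have hmodcast : PySem.Int.mod ((k:Int) * dx) ((row.toList.length : Nat) : Int)
        = ((((k:Int) * dx).toNat % row.toList.length : Nat) : Int) := by
      rw [PySem.Int.mod_eq_emod_of_pos hwyI]
      conv_lhs => rw [← Int.toNat_of_nonneg hxnn]
      push_cast
      rfl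
    have hB3 : PySem.Str.pyGet? row (PySem.Int.mod ((k:Int) * dx) ((row.toList.length : Nat) : Int))
        = row.toList[((k:Int) * dx).toNat % row.toList.length]? := by
      rw [hmodcast, PySem.Str.pyGet?_natCast]
    rw [hA2, hB2, hstep, hA3]
    simp only [hB3]

-- ===== VERDICT (by name: the statement is the Claim_ definition above) =====
theorem get_tree_hits_spec : Claim_equal_get_tree_hits := by
  intro dy dx rows _ hpre
  unfold Spec_get_tree_hits
  exact get_tree_hits_spec' dy dx rows hpre
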